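-- pv_equiv track=rewrite | github.com/architkithania/coding-challenges | distinct_substring.py | helper
-- ===== SOURCE A (Python) =====
-- def helper(string, k, length, dist):
--     if k == 0:
--         return length
--     if len(string) > 1:
--         sub_str = string[1:]
--         if string[0] not in dist:
--             dist.append(string[0])
--         if string[1] in dist:
--             return helper(sub_str, k, length + 1, dist)
--         return helper(sub_str, k - 1, length + 1, dist)
--     else:
--         return length
-- ===== SOURCE B (Python) =====
-- def helper(string, k, length, dist):
--     # Single pass over the string with an index and a hash set (no slicing, no
--     # recursion, no linear list-membership scans).  NOTE: A mutates `dist`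
--     # in place; B does not — the equivalence proved is about the return value.
--     seen = set(dist)
--     n = len(string)
--     i = 0
--     while k != 0 and i + 1 < n:
--         seen.add(string[i])
--         if string[i + 1] not in seen:
--             k -= 1
--         length += 1
--         i += 1
--     return length
-- ===== Notes on version B (the rewrite author's own statement) =====
-- stated objective: faster
-- what changed: Replaces A's recursion with string slicing and linear list-membership/append on dist by a single index-based while loop over the characters with a hash set for membership.
import Mathlib
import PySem

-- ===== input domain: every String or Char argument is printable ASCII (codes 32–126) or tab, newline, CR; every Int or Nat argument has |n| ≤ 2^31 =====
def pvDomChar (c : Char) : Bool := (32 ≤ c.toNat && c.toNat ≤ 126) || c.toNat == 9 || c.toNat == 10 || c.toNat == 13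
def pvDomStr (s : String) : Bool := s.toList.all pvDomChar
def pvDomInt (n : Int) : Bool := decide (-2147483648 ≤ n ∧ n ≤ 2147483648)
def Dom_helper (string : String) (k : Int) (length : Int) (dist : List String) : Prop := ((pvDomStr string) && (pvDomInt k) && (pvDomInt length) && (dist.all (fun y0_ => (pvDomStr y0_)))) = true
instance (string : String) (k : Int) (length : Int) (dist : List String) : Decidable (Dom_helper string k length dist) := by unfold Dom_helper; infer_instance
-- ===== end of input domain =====

-- B replaces A's slicing recursion + list membership/append by one index loop with a set;
-- A mutates `dist` in place, B does not — the equivalence proved is about the return value.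

-- ===== PORT A =====
-- A's recursion on `string` (len(string) > 1 ⇔ the char list has two heads);
-- string[0]/string[1] are 1-char strings compared against the list `dist`.
def helperA (s : List Char) (k : Int) (length : Int) (dist : List String) : Int :=
  if k = 0 then length
  else match s with
  | c0 :: c1 :: rest =>
      let d := if dist.contains (String.ofList [c0]) then dist else dist ++ [String.ofList [c0]]
      if d.contains (String.ofList [c1]) then helperA (c1 :: rest) k (length + 1) d
      else helperA (c1 :: rest) (k - 1) (length + 1) d
  | _ => length
termination_by s.length
decreasing_by all_goals simp

def helper (string : String) (k : Int) (length : Int) (dist : List String) : Int :=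
  helperA string.toList k length dist

-- ===== PORT B =====
-- B's while loop: index i, hash set `seen`; string[i] is in range whenever the loop runs,
-- so List.getD is exact here.
def helperAltLoop (cs : List Char) (n : Nat) (i : Nat) (k : Int) (length : Int) (seen : PySem.Set String) : Int :=
  if k ≠ 0 ∧ i + 1 < n then
    let seen' := PySem.Set.add seen (String.ofList [cs.getD i ' '])
    let k' := if seen'.contains (String.ofList [cs.getD (i + 1) ' ']) then k else k - 1
    helperAltLoop cs n (i + 1) k' (length + 1) seen'
  else length
termination_by n - i
decreasing_by omega

def helper_alt (string : String) (k : Int) (length : Int) (dist : List String) : Int :=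
  let cs := string.toList
  helperAltLoop cs cs.length 0 k length (PySem.Set.ofList dist)

-- ===== PRECONDITION & SPEC =====
def Spec_helper (string : String) (k : Int) (length : Int) (dist : List String) (out : Int) : Prop := out = helper_alt string k length dist
instance (string : String) (k : Int) (length : Int) (dist : List String) (out : Int) : Decidable (Spec_helper string k length dist out) := by unfold Spec_helper; infer_instance

-- ===== CLAIM (what is proved, stated in full; the proofs are below) =====
def Claim_equal_helper : Prop := ∀ (string : String) (k : Int) (length : Int) (dist : List String), Dom_helper string k length dist → Spec_helper string k length dist (helper string k length dist)

-- ===== LEMMAS AND PROOFS =====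

-- cons-style reading of B's loop (proof bridge only)
def auxB (s : List Char) (k : Int) (length : Int) (seen : PySem.Set String) : Int :=
  match s with
  | c0 :: c1 :: rest =>
      if k = 0 then length
      else
        let seen' := PySem.Set.add seen (String.ofList [c0])
        let k' := if seen'.contains (String.ofList [c1]) then k else k - 1
        auxB (c1 :: rest) k' (length + 1) seen'
  | _ => length
termination_by s.length
decreasing_by simp

-- appending to the list `dist` unless present = adding to the set of its elements
lemma ofList_cond (dist : List String) (x : String) :
    PySem.Set.ofList (if dist.contains x then dist else dist ++ [x])
      = PySem.Set.add (PySem.Set.ofList dist) x := by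
  by_cases hx : x ∈ dist
  · rw [if_pos (by simpa using hx),
      PySem.Set.add_of_mem (by simpa [PySem.Set.mem_ofList] using hx)]
  · rw [if_neg (by simpa using hx), PySem.Set.ofList_append_singleton]

-- a raw list and the set of its elements answer `contains` identically
lemma contains_ofList (l : List String) (x : String) :
    (PySem.Set.ofList l).contains x = l.contains x := by
  rw [Bool.eq_iff_iff]
  simp [PySem.Set.mem_ofList]

lemma loop_eq_auxB (cs : List Char) (i : Nat) (k length : Int) (seen : PySem.Set String) :
    helperAltLoop cs cs.length i k length seen = auxB (cs.drop i) k length seen := by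
  fun_induction helperAltLoop cs cs.length i k length seen with
  | case1 i k length seen h seen' k' ih =>
      obtain ⟨hk, hi⟩ := h
      rw [ih]
      conv_rhs => rw [List.drop_eq_getElem_cons (show i < cs.length by omega),
        List.drop_eq_getElem_cons hi, auxB]
      simp only [if_neg hk]
      rw [List.drop_eq_getElem_cons hi]
      have hseen : seen' = seen.add (String.ofList [cs[i]]) := by
        simp only [seen', List.getD_eq_getElem cs ' ' (show i < cs.length by omega)]
      have hk' : k' = (if (seen.add (String.ofList [cs[i]])).contains (String.ofList [cs[i + 1]]) = true then k else k - 1) := by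
        simp only [k', hseen, dite_eq_ite, List.getD_eq_getElem cs ' ' hi]
      rw [hk', hseen]
  | case2 i k length seen h =>
      by_cases hk : k = 0
      · rcases hd : cs.drop i with _ | ⟨a, _ | ⟨b, t⟩⟩ <;> simp [auxB, hk]
      · have hi : ¬ i + 1 < cs.length := by tauto
        have hlen : (cs.drop i).length ≤ 1 := by
          simp only [List.length_drop]; omega
        rcases hd : cs.drop i with _ | ⟨a, _ | ⟨b, t⟩⟩ <;> simp_all [auxB]

lemma A_eq_auxB (s : List Char) (k length : Int) (dist : List String) :
    helperA s k length dist = auxB s k length (PySem.Set.ofList dist) := by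
  fun_induction helperA s k length dist with
  | case1 s length dist =>
      rcases s with _ | ⟨a, _ | ⟨b, t⟩⟩ <;> simp [auxB]
  | case2 k length dist hk c0 c1 rest d hc ih =>
      have hd : PySem.Set.ofList d = PySem.Set.add (PySem.Set.ofList dist) (String.ofList [c0]) := by
        show PySem.Set.ofList (if _ : _ then _ else _) = _
        rw [dite_eq_ite, ofList_cond]
      have hc' : (PySem.Set.add (PySem.Set.ofList dist) (String.ofList [c0])).contains (String.ofList [c1]) = true := by
        rw [← hd, contains_ofList]; exact hc
      rw [ih, hd]
      conv_rhs => rw [auxB]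
      simp only [if_neg hk]
      rw [if_pos hc']
  | case3 k length dist hk c0 c1 rest d hc ih =>
      have hd : PySem.Set.ofList d = PySem.Set.add (PySem.Set.ofList dist) (String.ofList [c0]) := by
        show PySem.Set.ofList (if _ : _ then _ else _) = _
        rw [dite_eq_ite, ofList_cond]
      have hc' : ¬ (PySem.Set.add (PySem.Set.ofList dist) (String.ofList [c0])).contains (String.ofList [c1]) = true := by
        rw [← hd, contains_ofList]; exact hc
      rw [ih, hd]
      conv_rhs => rw [auxB]
      simp only [if_neg hk]
      rw [if_neg hc']
  | case4 s k length dist hk hs =>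
      rcases s with _ | ⟨a, _ | ⟨b, t⟩⟩
      · simp [auxB]
      · simp [auxB]
      · exact absurd rfl (hs a b t)

-- ===== VERDICT (by name: the statement is the Claim_ definition above) =====
theorem helper_spec : Claim_equal_helper := by
  intro string k length dist _
  show helper string k length dist = helper_alt string k length dist
  unfold helper helper_alt
  rw [loop_eq_auxB]
  exact A_eq_auxB _ _ _ _
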